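-- pv_equiv track=rewrite | github.com/antinaosDev/gen_enc | seed_postas_data.py | compute_risk
-- ===== SOURCE A (Python) =====
-- def compute_risk(active):
--     c_t3 = sum(1 for k,v in active.items() if k.startswith('t3') and v)
--     c_t4 = sum(1 for k,v in active.items() if k.startswith('t4') and v)
--     s_t3 = c_t3 * 4
--     s_t4 = c_t4 * 3
--     total = s_t3 + s_t4
--     if any(v for k,v in active.items() if k.startswith('t1') and v):
--         nivel = "RIESGO ALTO"
--     elif total >= 14:
--         nivel = "RIESGO ALTO"
--     elif total >= 7:
--         nivel = "RIESGO MEDIO"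
--     elif total > 0:
--         nivel = "RIESGO BAJO"
--     else:
--         nivel = "SIN RIESGO"
--     return total, nivel
-- ===== SOURCE B (Python) =====
-- def compute_risk(active):
--     # Count truthy flags by their two-character prefix in one histogram,
--     # then read the verdict off a threshold table.
--     counts = {}
--     for k, v in active.items():
--         if v:
--             p = k[:2]
--             counts[p] = counts.get(p, 0) + 1
--     total = 4 * counts.get('t3', 0) + 3 * counts.get('t4', 0)
--     if counts.get('t1', 0) > 0:
--         nivel = "RIESGO ALTO"
--     else:
--         nivel = next(lbl for bound, lbl in
--                      ((14, "RIESGO ALTO"), (7, "RIESGO MEDIO"),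
--                       (1, "RIESGO BAJO"), (0, "SIN RIESGO"))
--                      if total >= bound)
--     return total, nivel
-- ===== Notes on version B (the rewrite author's own statement) =====
-- stated objective: alternative
-- what changed: Instead of A's three predicate scans (two generator-sum counts on startswith and an any()), B builds a single histogram dict keyed by each truthy key's two-character prefix, reads the t3/t4/t1 figures from the histogram with O(1) lookups, and picks the level from a threshold table with next() instead of an if/elif cascade.
import Mathlib
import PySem

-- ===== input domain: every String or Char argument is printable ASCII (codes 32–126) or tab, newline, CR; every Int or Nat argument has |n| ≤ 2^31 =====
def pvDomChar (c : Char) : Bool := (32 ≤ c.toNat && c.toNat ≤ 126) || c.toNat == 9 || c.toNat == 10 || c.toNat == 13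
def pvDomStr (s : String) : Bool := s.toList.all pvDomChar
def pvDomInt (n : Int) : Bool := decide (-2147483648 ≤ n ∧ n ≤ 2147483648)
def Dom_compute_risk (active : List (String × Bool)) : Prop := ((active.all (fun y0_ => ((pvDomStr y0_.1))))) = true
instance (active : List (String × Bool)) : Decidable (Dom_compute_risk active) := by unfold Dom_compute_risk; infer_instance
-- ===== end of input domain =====

-- B replaces A's three predicate scans with one prefix histogram plus a threshold-table lookup; same asymptotic cost.
-- ===== PORT A =====
def compute_risk (active : List (String × Bool)) : Int × String :=
  let c_t3 : Int := active.foldl (fun acc kv => if PySem.Str.startswith kv.1 "t3" && kv.2 then acc + 1 else acc) 0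
  let c_t4 : Int := active.foldl (fun acc kv => if PySem.Str.startswith kv.1 "t4" && kv.2 then acc + 1 else acc) 0
  let s_t3 := c_t3 * 4
  let s_t4 := c_t4 * 3
  let total := s_t3 + s_t4
  let nivel :=
    if active.any (fun kv => PySem.Str.startswith kv.1 "t1" && kv.2) then "RIESGO ALTO"
    else if total ≥ 14 then "RIESGO ALTO"
    else if total ≥ 7 then "RIESGO MEDIO"
    else if total > 0 then "RIESGO BAJO"
    else "SIN RIESGO"
  (total, nivel)

-- ===== PORT B =====
-- histogram of the two-char prefixes (k[:2]) of the truthy keys, then table lookup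
def compute_risk_alt (active : List (String × Bool)) : Int × String :=
  let counts : PySem.Dict String Int :=
    PySem.Dict.counter ((active.filter (fun kv => kv.2)).map
      (fun kv => PySem.Str.slice kv.1 none (some 2)))
  let total : Int := 4 * counts.getD "t3" 0 + 3 * counts.getD "t4" 0
  let nivel :=
    if counts.getD "t1" 0 > 0 then "RIESGO ALTO"
    else
      -- next(lbl for bound,lbl in table if total >= bound); the (0, …) row always
      -- matches (total ≥ 0), so the StopIteration default "" is unreachable
      ((([((14:Int), "RIESGO ALTO"), (7, "RIESGO MEDIO"), (1, "RIESGO BAJO"),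
          (0, "SIN RIESGO")] : List (Int × String)).find?
            (fun bl => total ≥ bl.1)).map (fun bl => bl.2)).getD ""
  (total, nivel)

-- ===== PRECONDITION & SPEC =====
def Spec_compute_risk (active : List (String × Bool)) (out : Int × String) : Prop := out = compute_risk_alt active
instance (active : List (String × Bool)) (out : Int × String) : Decidable (Spec_compute_risk active out) := by unfold Spec_compute_risk; infer_instance

-- ===== CLAIM =====
def Claim_equal_compute_risk : Prop := ∀ (active : List (String × Bool)), Dom_compute_risk active → Spec_compute_risk active (compute_risk active)

-- ===== LEMMAS AND PROOFS =====
-- k.startswith(p) ↔ k[:2] == p, for a two-character p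
theorem slice2_eq_iff (k p : String) (hp : p.toList.length = 2) :
    (PySem.Str.slice k none (some 2) = p) ↔ (PySem.Str.startswith k p = true) := by
  rw [PySem.Str.startswith_eq, PySem.Chars.startswith_iff, List.prefix_iff_eq_take, hp,
      ← String.toList_inj]
  have h : (PySem.Str.slice k none (some 2)).toList = k.toList.take 2 := by
    simp [PySem.Str.toList_slice, PySem.List.slice_to]
  rw [h, eq_comm]

-- A's counting fold equals a count in B's list of truthy-key prefixes
theorem count_fold (active : List (String × Bool)) (p : String) (hp : p.toList.length = 2) (c : Int) :
    active.foldl (fun acc kv => if PySem.Str.startswith kv.1 p && kv.2 then acc + 1 else acc) c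
      = c + (((active.filter (fun kv => kv.2)).map
          (fun kv => PySem.Str.slice kv.1 none (some 2))).count p : Int) := by
  induction active generalizing c with
  | nil => simp
  | cons kv rest ih =>
    obtain ⟨k, v⟩ := kv
    cases v with
    | false => simpa using ih c
    | true =>
      by_cases h : PySem.Str.startswith k p = true
      · have he : PySem.Str.slice k none (some 2) = p := (slice2_eq_iff k p hp).mpr h
        have hf : List.filter (fun kv => kv.2) ((k, true) :: rest)
            = (k, true) :: List.filter (fun kv => kv.2) rest := by simp
        simp only [List.foldl_cons, Bool.and_true]
        rw [if_pos h, ih, hf, List.map_cons, List.count_cons, he]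
        simp only [beq_self_eq_true, if_true]
        push_cast
        ring
      · have he : (PySem.Str.slice k none (some 2) == p) = false := by
          simp only [beq_eq_false_iff_ne, ne_eq]
          exact fun e => h ((slice2_eq_iff k p hp).mp e)
        have hf : List.filter (fun kv => kv.2) ((k, true) :: rest)
            = (k, true) :: List.filter (fun kv => kv.2) rest := by simp
        simp only [List.foldl_cons, Bool.and_true]
        rw [if_neg h, ih, hf, List.map_cons, List.count_cons, he]
        simp

-- A's any() over t1 keys ↔ B's histogram count of "t1" is positive
theorem any_t1 (active : List (String × Bool)) :
    active.any (fun kv => PySem.Str.startswith kv.1 "t1" && kv.2) = true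
      ↔ (0:Int) < (((active.filter (fun kv => kv.2)).map
          (fun kv => PySem.Str.slice kv.1 none (some 2))).count "t1" : Int) := by
  rw [Int.natCast_pos, List.count_pos_iff, List.any_eq_true]
  simp only [List.mem_map, List.mem_filter, Bool.and_eq_true]
  constructor
  · rintro ⟨kv, hm, h1, h2⟩
    exact ⟨kv, ⟨hm, h2⟩, (slice2_eq_iff _ _ (by decide)).mpr h1⟩
  · rintro ⟨kv, ⟨hm, h2⟩, he⟩
    exact ⟨kv, hm, (slice2_eq_iff _ _ (by decide)).mp he, h2⟩

-- ===== VERDICT =====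
theorem compute_risk_spec : Claim_equal_compute_risk := by
  intro active _
  unfold Spec_compute_risk compute_risk compute_risk_alt
  simp only [PySem.Dict.getD_counter]
  rw [count_fold active "t3" (by decide) 0, count_fold active "t4" (by decide) 0]
  set n3 : Nat := ((active.filter (fun kv => kv.2)).map
      (fun kv => PySem.Str.slice kv.1 none (some 2))).count "t3" with hn3
  set n4 : Nat := ((active.filter (fun kv => kv.2)).map
      (fun kv => PySem.Str.slice kv.1 none (some 2))).count "t4" with hn4
  set n1 : Nat := ((active.filter (fun kv => kv.2)).map
      (fun kv => PySem.Str.slice kv.1 none (some 2))).count "t1" with hn1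
  have hany := any_t1 active
  rw [← hn1] at hany
  simp only [Prod.mk.injEq]
  constructor
  · ring
  · by_cases hb : active.any (fun kv => PySem.Str.startswith kv.1 "t1" && kv.2) = true
    · rw [if_pos hb, if_pos (hany.mp hb)]
    · rw [if_neg hb, if_neg (fun h => hb (hany.mpr h))]
      have hE : (0 + (n3:Int)) * 4 + (0 + (n4:Int)) * 3 = 4 * (n3:Int) + 3 * (n4:Int) := by ring
      rw [hE]
      have hnn : (0:Int) ≤ 4 * (n3:Int) + 3 * (n4:Int) := by positivity
      by_cases h14 : 4 * (n3:Int) + 3 * (n4:Int) ≥ 14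
      · simp [List.find?, h14]
      · by_cases h7 : 4 * (n3:Int) + 3 * (n4:Int) ≥ 7
        · simp [List.find?, h14, h7]
        · by_cases h0 : 4 * (n3:Int) + 3 * (n4:Int) > 0
          · have hge1 : 4 * (n3:Int) + 3 * (n4:Int) ≥ 1 := h0
            simp [List.find?, h14, h7, h0, hge1]
          · have hne1 : ¬ 4 * (n3:Int) + 3 * (n4:Int) ≥ 1 := by omega
            simp [List.find?, h14, h7, h0, hne1, hnn]
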